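-- pv_equiv track=rewrite | github.com/agsosa96/Entregables-Programacion-I | Practica Parcial 2/Ejercicio 2.py | calcularCosto
-- ===== SOURCE A (Python) =====
-- def calcularCosto(array2):
--     costo = 0
--     for i in range(len(array2)):
--         for j in range(len(array2[i])):
--             if((array2[i][j] >= 'a' and array2[i][j] <= 'z') or (array2[i][j] >= 'A' and array2[i][j] <= 'Z')):
--                 costo = costo + 100
--             elif(array2[i][j] >= '0' and array2[i][j] <= '9'):
--                 costo = costo + 90
--             else:
--                 costo = costo + 130
--
--     return costo
-- ===== SOURCE B (Python) =====
-- def calcularCosto(array2):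
--     flat = [s for fila in array2 for s in fila]
--     N = len(flat)
--     L = sum(1 for s in flat if ('a' <= s <= 'z') or ('A' <= s <= 'Z'))
--     D = sum(1 for s in flat if '0' <= s <= '9')
--     return 130 * N - 30 * L - 40 * D
-- ===== Notes on version B (the rewrite author's own statement) =====
-- stated objective: alternative
-- what changed: Replaces the per-element branch-and-accumulate nested index loops with a count-then-arithmetic decomposition: flatten once, count total/letter-range/digit-range elements with the same lexicographic comparisons, and return the closed form 130*N - 30*L - 40*D (valid because the two ranges are disjoint).
import Mathlib
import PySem

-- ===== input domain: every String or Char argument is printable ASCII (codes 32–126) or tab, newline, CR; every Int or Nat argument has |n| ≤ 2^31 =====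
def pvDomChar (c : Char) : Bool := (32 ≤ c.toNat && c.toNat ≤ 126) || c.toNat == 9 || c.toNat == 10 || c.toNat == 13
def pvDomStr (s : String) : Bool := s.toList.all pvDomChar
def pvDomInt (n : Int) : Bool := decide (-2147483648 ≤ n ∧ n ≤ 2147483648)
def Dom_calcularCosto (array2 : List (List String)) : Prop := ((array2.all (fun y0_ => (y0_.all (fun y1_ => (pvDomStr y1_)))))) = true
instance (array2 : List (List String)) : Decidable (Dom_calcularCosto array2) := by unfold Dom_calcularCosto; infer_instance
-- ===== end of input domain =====

-- B replaces the branch-and-accumulate nested loops by counting total/letter/digit elements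
-- once and returning the closed form 130*N - 30*L - 40*D (alternative decomposition, same cost).


-- ===== PORT A =====
-- literal port of A: nested loops, per-element branch adding 100 / 90 / 130
def calcularCosto (array2 : List (List String)) : Int :=
  array2.foldl (fun costo fila =>
    fila.foldl (fun costo s =>
      if ("a" ≤ s ∧ s ≤ "z") ∨ ("A" ≤ s ∧ s ≤ "Z") then costo + 100
      else if "0" ≤ s ∧ s ≤ "9" then costo + 90
      else costo + 130) costo) 0

-- ===== PORT B =====
def pvIsLetterRange (s : String) : Bool := ("a" ≤ s && s ≤ "z") || ("A" ≤ s && s ≤ "Z")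
def pvIsDigitRange (s : String) : Bool := "0" ≤ s && s ≤ "9"

def calcularCosto_alt (array2 : List (List String)) : Int :=
  let flat := array2.flatten
  let N : Int := flat.length
  let L : Int := flat.countP pvIsLetterRange
  let D : Int := flat.countP pvIsDigitRange
  130 * N - 30 * L - 40 * D

-- ===== PRECONDITION & SPEC =====
def Spec_calcularCosto (array2 : List (List String)) (out : Int) : Prop := out = calcularCosto_alt array2
instance (array2 : List (List String)) (out : Int) : Decidable (Spec_calcularCosto array2 out) := by unfold Spec_calcularCosto; infer_instance

-- ===== CLAIM (what is proved, stated in full; the proofs are below) =====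
def Claim_equal_calcularCosto : Prop := ∀ (array2 : List (List String)), Dom_calcularCosto array2 → Spec_calcularCosto array2 (calcularCosto array2)

-- ===== LEMMAS AND PROOFS =====

-- the two lexicographic ranges are disjoint: a string ≤ "9" is < "A" and < "a"
lemma digit_not_letter (s : String) (h : pvIsDigitRange s = true) : pvIsLetterRange s = false := by
  simp [pvIsDigitRange] at h
  simp [pvIsLetterRange]
  constructor
  · intro hle
    exact absurd (le_trans hle h.2) (by decide)
  · intro hle
    exact absurd (le_trans hle h.2) (by decide)

-- the inner accumulation over one flat list equals the counting closed form
lemma foldl_cost (l : List String) (a : Int) :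
    l.foldl (fun costo s =>
      if ("a" ≤ s ∧ s ≤ "z") ∨ ("A" ≤ s ∧ s ≤ "Z") then costo + 100
      else if "0" ≤ s ∧ s ≤ "9" then costo + 90
      else costo + 130) a
    = a + 130 * (l.length : Int) - 30 * (l.countP pvIsLetterRange : Int)
        - 40 * (l.countP pvIsDigitRange : Int) := by
  induction l generalizing a with
  | nil => simp
  | cons s t ih =>
    by_cases hl : pvIsLetterRange s = true
    · have hd : pvIsDigitRange s = false := by
        by_contra hc
        rw [digit_not_letter s (by simpa using hc)] at hl
        exact absurd hl (by simp)
      have hl' : ("a" ≤ s ∧ s ≤ "z") ∨ ("A" ≤ s ∧ s ≤ "Z") := by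
        simpa [pvIsLetterRange] using hl
      simp only [List.foldl_cons, List.countP_cons, hl, hd, if_pos hl', ih]
      push_cast [List.length_cons]
      ring
    · by_cases hd : pvIsDigitRange s = true
      · have hl' : ¬ (("a" ≤ s ∧ s ≤ "z") ∨ ("A" ≤ s ∧ s ≤ "Z")) := by
          simpa [pvIsLetterRange] using hl
        have hd' : "0" ≤ s ∧ s ≤ "9" := by simpa [pvIsDigitRange] using hd
        simp only [List.foldl_cons, List.countP_cons, hl, hd, if_neg hl', if_pos hd', ih,
          Bool.false_eq_true, if_false, if_true]
        push_cast [List.length_cons]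
        ring
      · have hl' : ¬ (("a" ≤ s ∧ s ≤ "z") ∨ ("A" ≤ s ∧ s ≤ "Z")) := by
          simpa [pvIsLetterRange] using hl
        have hd' : ¬ ("0" ≤ s ∧ s ≤ "9") := by simpa [pvIsDigitRange] using hd
        simp only [List.foldl_cons, List.countP_cons, hl, hd, if_neg hl', if_neg hd', ih,
          Bool.false_eq_true, if_false]
        push_cast [List.length_cons]
        ring

-- ===== VERDICT (by name: the statement is the Claim_ definition above) =====
theorem calcularCosto_spec : Claim_equal_calcularCosto := by
  intro array2 _
  unfold Spec_calcularCosto calcularCosto calcularCosto_alt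
  rw [← List.foldl_flatten, foldl_cost]
  ring
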